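-- pv_equiv track=rewrite | github.com/GreenHatHG/AlphaVault | weibo_display.py | _format_markdown_text
-- ===== SOURCE A (Python) =====
-- from typing import Iterable, List, Optional
--
-- def _format_markdown_text(text: str) -> str:
--     """
--     Preserve author-intended line breaks inside Markdown by converting single
--     newlines to hard breaks, while keeping paragraph breaks.
--     """
--     value = str(text or "")
--     if "\n" not in value:
--         return value
--
--     paragraphs = value.split("\n\n")
--     formatted: List[str] = []
--     for para in paragraphs:
--         lines = para.split("\n")
--         formatted.append("  \n".join(lines))
--     return "\n\n".join(formatted)
-- ===== SOURCE B (Python) =====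
-- def _format_markdown_text(text: str) -> str:
--     """
--     Convert single newlines to Markdown hard breaks, keeping paragraph breaks.
--     Single left-to-right scan: a "\n\n" pair is kept as a paragraph break,
--     any remaining lone "\n" becomes a hard break "  \n".
--     """
--     value = str(text or "")
--     out = []
--     i = 0
--     n = len(value)
--     while i < n:
--         if value.startswith("\n\n", i):
--             out.append("\n\n")
--             i += 2
--         elif value[i] == "\n":
--             out.append("  \n")
--             i += 1
--         else:
--             out.append(value[i])
--             i += 1
--     return "".join(out)
-- ===== Notes on version B (the rewrite author's own statement) =====
-- stated objective: simpler
-- what changed: Replaces the split-into-paragraphs / inner-split / join / join pipeline with one left-to-right scan that keeps each leftmost "\n\n" pair and turns every remaining lone "\n" into " \n".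
import Mathlib
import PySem

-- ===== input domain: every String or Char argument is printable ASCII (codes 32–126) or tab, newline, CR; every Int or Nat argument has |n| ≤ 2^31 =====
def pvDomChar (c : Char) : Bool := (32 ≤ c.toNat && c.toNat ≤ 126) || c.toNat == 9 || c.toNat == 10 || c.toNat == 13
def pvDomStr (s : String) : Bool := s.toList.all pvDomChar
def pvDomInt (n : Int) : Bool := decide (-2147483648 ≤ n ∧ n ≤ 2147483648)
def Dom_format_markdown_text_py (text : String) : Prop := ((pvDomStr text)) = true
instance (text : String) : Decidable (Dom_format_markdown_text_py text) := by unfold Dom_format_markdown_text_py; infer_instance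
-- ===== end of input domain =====

-- B replaces A's split-into-paragraphs / inner-split / join / join pipeline with a single
-- left-to-right scan over the characters (objective: simpler; same asymptotic cost).

-- ===== PORT A =====
def format_markdown_text_py (text : String) : String :=
  -- value = str(text or "")  (identity on str: "" stays "", anything else is itself)
  let value := if text = "" then "" else text
  if PySem.Str.isIn "\n" value = false then value
  else
    -- sep "\n\n" is nonempty, so split? never returns none; .getD [] is unreachable
    let paragraphs := (PySem.Str.split? value "\n\n").getD []
    let formatted := paragraphs.foldl
      (fun acc para => acc ++ [PySem.Str.join "  \n" ((PySem.Str.split? para "\n").getD [])]) []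
    PySem.Str.join "\n\n" formatted

-- ===== PORT B =====
-- the while-loop of Source B: consume "\n\n" whole, turn a lone "\n" into "  \n", copy anything else
def altGo : List Char → List Char
  | '\n' :: '\n' :: rest => '\n' :: '\n' :: altGo rest
  | '\n' :: rest => ' ' :: ' ' :: '\n' :: altGo rest
  | c :: rest => c :: altGo rest
  | [] => []

def format_markdown_text_py_alt (text : String) : String :=
  let value := if text = "" then "" else text
  String.ofList (altGo value.toList)

-- ===== PRECONDITION & SPEC =====
def Spec_format_markdown_text_py (text : String) (out : String) : Prop := out = format_markdown_text_py_alt text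
instance (text : String) (out : String) : Decidable (Spec_format_markdown_text_py text out) := by unfold Spec_format_markdown_text_py; infer_instance

-- ===== CLAIM (what is proved, stated in full; the proofs are below) =====
def Claim_equal_format_markdown_text_py : Prop := ∀ (text : String), Dom_format_markdown_text_py text → Spec_format_markdown_text_py text (format_markdown_text_py text)

-- ===== LEMMAS AND PROOFS =====

-- splitOn.go: the accumulator prepends, reversed
lemma go_acc (sep : List Char) : ∀ (fuel : Nat) (l cur : List Char) (acc : List (List Char)),
    PySem.Chars.splitOn.go sep fuel l cur acc = acc.reverse ++ PySem.Chars.splitOn.go sep fuel l cur [] := by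
  intro fuel
  induction fuel with
  | zero => intro l cur acc; simp [PySem.Chars.splitOn.go]
  | succ n ih =>
    intro l cur acc
    cases l with
    | nil => simp [PySem.Chars.splitOn.go]
    | cons c rest =>
      simp only [PySem.Chars.splitOn.go]
      split
      · rw [ih (List.drop sep.length (c :: rest)) [] (cur.reverse :: acc),
            ih (List.drop sep.length (c :: rest)) [] [cur.reverse]]
        simp
      · rw [ih rest (c :: cur) acc]

-- splitOn.go: the current-piece buffer prefixes the first piece
lemma go_cur (sep : List Char) : ∀ (fuel : Nat) (l cur : List Char),
    PySem.Chars.splitOn.go sep fuel l cur [] =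
      (PySem.Chars.splitOn.go sep fuel l [] []).modifyHead (cur.reverse ++ ·) := by
  intro fuel
  induction fuel with
  | zero => intro l cur; simp [PySem.Chars.splitOn.go]
  | succ n ih =>
    intro l cur
    cases l with
    | nil => simp [PySem.Chars.splitOn.go]
    | cons c rest =>
      simp only [PySem.Chars.splitOn.go]
      split
      · rw [go_acc sep n (List.drop sep.length (c :: rest)) [] [cur.reverse],
            go_acc sep n (List.drop sep.length (c :: rest)) [] [[].reverse]]
        cases PySem.Chars.splitOn.go sep n (List.drop sep.length (c :: rest)) [] [] <;> simp
      · rw [ih rest (c :: cur), ih rest [c]]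
        cases PySem.Chars.splitOn.go sep n rest [] [] <;> simp

lemma go_ne_nil (sep : List Char) : ∀ (fuel : Nat) (l cur : List Char) (acc : List (List Char)),
    PySem.Chars.splitOn.go sep fuel l cur acc ≠ [] := by
  intro fuel
  induction fuel with
  | zero => intro l cur acc; simp [PySem.Chars.splitOn.go]
  | succ n ih =>
    intro l cur acc
    cases l with
    | nil => simp [PySem.Chars.splitOn.go]
    | cons c rest =>
      simp only [PySem.Chars.splitOn.go]
      split
      · exact ih _ _ _
      · exact ih _ _ _

-- fuel does not matter once it exceeds the remaining length
lemma go_fuel (sep : List Char) (hsep : sep ≠ []) :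
    ∀ (fuel₁ : Nat) (l : List Char) (fuel₂ : Nat), l.length < fuel₁ → l.length < fuel₂ →
    PySem.Chars.splitOn.go sep fuel₁ l [] [] = PySem.Chars.splitOn.go sep fuel₂ l [] [] := by
  intro fuel₁
  induction fuel₁ with
  | zero => intro l fuel₂ h1 h2; omega
  | succ n ih =>
    intro l fuel₂ h1 h2
    cases l with
    | nil =>
      cases fuel₂ with
      | zero => omega
      | succ m => simp [PySem.Chars.splitOn.go]
    | cons c rest =>
      cases fuel₂ with
      | zero => omega
      | succ m =>
        simp only [PySem.Chars.splitOn.go]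
        split
        · rename_i hpre
          have hlen : (List.drop sep.length (c :: rest)).length < n := by
            have hs : 1 ≤ sep.length := by
              cases sep with
              | nil => exact absurd rfl hsep
              | cons a b => simp
            simp only [List.length_drop]
            simp only [List.length_cons] at h1 ⊢
            omega
          have hlen2 : (List.drop sep.length (c :: rest)).length < m := by
            have hs : 1 ≤ sep.length := by
              cases sep with
              | nil => exact absurd rfl hsep
              | cons a b => simp
            simp only [List.length_drop]
            simp only [List.length_cons] at h2 ⊢
            omega
          rw [go_acc, go_acc (fuel := m)]
          rw [ih _ _ hlen hlen2]
        · have hr1 : rest.length < n := by simp at h1; omega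
          have hr2 : rest.length < m := by simp at h2; omega
          rw [go_cur, go_cur (fuel := m)]
          rw [ih _ _ hr1 hr2]

lemma splitOn_ne_nil (l sep : List Char) : PySem.Chars.splitOn l sep ≠ [] := by
  unfold PySem.Chars.splitOn
  exact go_ne_nil _ _ _ _ _

lemma splitOn_nil (sep : List Char) : PySem.Chars.splitOn [] sep = [[]] := by
  simp [PySem.Chars.splitOn, PySem.Chars.splitOn.go]

lemma splitOn_prefix (l sep : List Char) (hsep : sep ≠ []) (hpre : sep.isPrefixOf l) :
    PySem.Chars.splitOn l sep = [] :: PySem.Chars.splitOn (l.drop sep.length) sep := by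
  cases l with
  | nil =>
    cases sep with
    | nil => exact absurd rfl hsep
    | cons a b => simp [List.isPrefixOf] at hpre
  | cons c rest =>
    unfold PySem.Chars.splitOn
    conv_lhs => rw [show (c :: rest).length + 1 = ((c :: rest).length) + 1 from rfl]
    simp only [PySem.Chars.splitOn.go, hpre, if_pos]
    rw [go_acc]
    have hs : 1 ≤ sep.length := by
      cases sep with
      | nil => exact absurd rfl hsep
      | cons a b => simp
    have : (List.drop sep.length (c :: rest)).length < (c :: rest).length := by
      simp only [List.length_drop, List.length_cons]
      omega
    rw [go_fuel sep hsep _ _ ((List.drop sep.length (c :: rest)).length + 1) this (by omega)]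
    simp

lemma splitOn_cons_not_prefix (c : Char) (rest sep : List Char) (hsep : sep ≠ [])
    (h : ¬ sep.isPrefixOf (c :: rest)) :
    PySem.Chars.splitOn (c :: rest) sep = (PySem.Chars.splitOn rest sep).modifyHead (c :: ·) := by
  unfold PySem.Chars.splitOn
  simp only [PySem.Chars.splitOn.go, h, if_neg, Bool.not_eq_true]
  rw [go_cur]
  rw [go_fuel sep hsep _ _ (rest.length + 1) (by simp) (by omega)]
  rfl

-- join over a head that is itself an append
lemma join_head_append (sep a b : List Char) (t : List (List Char)) :
    PySem.Chars.join sep ((a ++ b) :: t) = a ++ PySem.Chars.join sep (b :: t) := by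
  cases t with
  | nil => simp [PySem.Chars.join, List.intercalate]
  | cons x t' => simp [PySem.Chars.join, List.intercalate]

lemma join_nil_cons (sep : List Char) (x : List Char) (t : List (List Char)) :
    PySem.Chars.join sep ([] :: x :: t) = sep ++ PySem.Chars.join sep (x :: t) := by
  simp [PySem.Chars.join, List.intercalate]

-- the inner pass: "  \n".join(para.split("\n")), characterised one character at a time
lemma inner_nil : PySem.Chars.join [' ', ' ', '\n'] (PySem.Chars.splitOn [] ['\n']) = [] := by
  rw [splitOn_nil]
  exact PySem.Chars.join_singleton _ _

lemma inner_newline (h : List Char) :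
    PySem.Chars.join [' ', ' ', '\n'] (PySem.Chars.splitOn ('\n' :: h) ['\n']) =
      ' ' :: ' ' :: '\n' :: PySem.Chars.join [' ', ' ', '\n'] (PySem.Chars.splitOn h ['\n']) := by
  rw [splitOn_prefix ('\n' :: h) ['\n'] (by simp) (by simp [List.isPrefixOf])]
  simp only [List.length_cons, List.length_nil, List.drop_succ_cons, List.drop_zero]
  cases hS : PySem.Chars.splitOn h ['\n'] with
  | nil => exact absurd hS (splitOn_ne_nil _ _)
  | cons g0 gt => rw [join_nil_cons]; rfl

lemma inner_other (c : Char) (h : List Char) (hc : c ≠ '\n') :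
    PySem.Chars.join [' ', ' ', '\n'] (PySem.Chars.splitOn (c :: h) ['\n']) =
      c :: PySem.Chars.join [' ', ' ', '\n'] (PySem.Chars.splitOn h ['\n']) := by
  rw [splitOn_cons_not_prefix c h ['\n'] (by simp)
    (by simp [List.isPrefixOf]; exact fun e => hc e.symm)]
  cases hS : PySem.Chars.splitOn h ['\n'] with
  | nil => exact absurd hS (splitOn_ne_nil _ _)
  | cons g0 gt =>
    simp only [List.modifyHead]
    have := join_head_append [' ', ' ', '\n'] [c] g0 gt
    simpa using this

-- the heart of the equivalence: A's split/join pipeline IS the single scan altGo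
lemma pipeline_eq_altGo : ∀ (cs : List Char),
    PySem.Chars.join ['\n', '\n']
      ((PySem.Chars.splitOn cs ['\n', '\n']).map
        (fun p => PySem.Chars.join [' ', ' ', '\n'] (PySem.Chars.splitOn p ['\n']))) = altGo cs := by
  intro cs
  induction cs using altGo.induct with
  | case1 rest ih =>
    rw [splitOn_prefix _ _ (by simp) (by simp [List.isPrefixOf])]
    simp only [List.length_cons, List.length_nil, List.drop_succ_cons, List.drop_zero,
      List.map_cons, inner_nil]
    cases hS : PySem.Chars.splitOn rest ['\n', '\n'] with
    | nil => exact absurd hS (splitOn_ne_nil _ _)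
    | cons s0 st =>
      rw [List.map_cons, join_nil_cons, altGo, ← ih, hS, List.map_cons]
      rfl
  | case2 rest h ih =>
    have hpre : ¬ (['\n', '\n'].isPrefixOf ('\n' :: rest) = true) := by
      cases rest with
      | nil => simp [List.isPrefixOf]
      | cons d r =>
        intro hcontra
        simp [List.isPrefixOf] at hcontra
        exact h r (by rw [← hcontra])
    rw [splitOn_cons_not_prefix _ _ _ (by simp) hpre]
    cases hS : PySem.Chars.splitOn rest ['\n', '\n'] with
    | nil => exact absurd hS (splitOn_ne_nil _ _)
    | cons s0 st =>
      simp only [List.modifyHead, List.map_cons]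
      rw [inner_newline]
      have hj := join_head_append ['\n', '\n'] [' ', ' ', '\n']
        (PySem.Chars.join [' ', ' ', '\n'] (PySem.Chars.splitOn s0 ['\n']))
        ((st.map (fun p => PySem.Chars.join [' ', ' ', '\n'] (PySem.Chars.splitOn p ['\n']))))
      simp only [List.cons_append, List.nil_append] at hj
      rw [hj]
      rw [hS, List.map_cons] at ih
      rw [ih, altGo]
      exact h
  | case3 c rest h1 h2 ih =>
    have hc : c ≠ '\n' := fun e => h2 e
    have hpre : ¬ (['\n', '\n'].isPrefixOf (c :: rest) = true) := by
      simp [List.isPrefixOf]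
      exact fun e => absurd e.symm hc
    rw [splitOn_cons_not_prefix _ _ _ (by simp) hpre]
    cases hS : PySem.Chars.splitOn rest ['\n', '\n'] with
    | nil => exact absurd hS (splitOn_ne_nil _ _)
    | cons s0 st =>
      simp only [List.modifyHead, List.map_cons]
      rw [inner_other c s0 hc]
      have hj := join_head_append ['\n', '\n'] [c]
        (PySem.Chars.join [' ', ' ', '\n'] (PySem.Chars.splitOn s0 ['\n']))
        ((st.map (fun p => PySem.Chars.join [' ', ' ', '\n'] (PySem.Chars.splitOn p ['\n']))))
      simp only [List.cons_append, List.nil_append] at hj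
      rw [hj]
      rw [hS, List.map_cons] at ih
      rw [ih, altGo]
      · exact h1
      · exact h2
  | case4 =>
    rw [splitOn_nil]
    simp only [List.map_cons, List.map_nil, inner_nil]
    rw [PySem.Chars.join_singleton]
    rfl

lemma altGo_no_newline : ∀ (cs : List Char), '\n' ∉ cs → altGo cs = cs := by
  intro cs
  induction cs using altGo.induct with
  | case1 rest ih => intro h; simp at h
  | case2 rest h ih => intro hm; simp at hm
  | case3 c rest h1 h2 ih =>
    intro hm
    rw [altGo, ih (fun hx => hm (List.mem_cons_of_mem _ hx))]
    · exact h1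
    · exact h2
  | case4 => intro _; rfl

-- ===== VERDICT (by name: the statement is the Claim_ definition above) =====
theorem format_markdown_text_py_spec : Claim_equal_format_markdown_text_py := by
  intro text _
  have hval : (if text = "" then "" else text) = text := by split <;> simp_all
  simp only [Spec_format_markdown_text_py, format_markdown_text_py, format_markdown_text_py_alt,
    hval]
  by_cases hin : PySem.Str.isIn "\n" text = false
  · rw [if_pos hin]
    have hni : '\n' ∉ text.toList := by
      have hx := (PySem.Chars.isIn_eq_false_iff ("\n".toList) text.toList).mp (by simpa using hin)
      rw [show ("\n".toList) = ['\n'] from rfl, List.singleton_infix_iff] at hx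
      exact hx
    rw [altGo_no_newline text.toList hni]
    simp
  · rw [if_neg hin]
    have hsplit : PySem.Str.split? text "\n\n" =
        some ((PySem.Chars.splitOn text.toList ['\n', '\n']).map String.ofList) := rfl
    rw [hsplit]
    simp only [Option.getD_some]
    rw [PySem.List.foldl_append_singleton_eq_map]
    simp only [List.nil_append, List.map_map]
    have hinner : ∀ (p : List Char),
        PySem.Str.split? (String.ofList p) "\n" =
          some ((PySem.Chars.splitOn p ['\n']).map String.ofList) := by
      intro p
      simp only [PySem.Str.split?, PySem.Chars.split?, String.toList_ofList]
      rfl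
    rw [show (String.ofList (altGo text.toList)) =
        String.ofList (PySem.Chars.join ['\n', '\n']
          ((PySem.Chars.splitOn text.toList ['\n', '\n']).map
            (fun p => PySem.Chars.join [' ', ' ', '\n'] (PySem.Chars.splitOn p ['\n'])))) from by
      rw [pipeline_eq_altGo]]
    simp only [PySem.Str.join, Function.comp_def, hinner, Option.getD_some, List.map_map]
    congr 1
    congr 1
    simp only [String.toList_ofList, List.map_id',
      show ("  \n".toList) = [' ', ' ', '\n'] from rfl]
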